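-- pv_equiv track=rewrite | github.com/langcog/levante-bench | src/levante_bench/evaluation/runner.py | _two_letter_language_code
-- ===== SOURCE A (Python) =====
-- def _two_letter_language_code(language: object) -> str | None:
--     """Extract a normalized 2-letter language code from a locale string."""
--     value = str(language or "").strip()
--     if not value:
--         return None
--     primary = value.split("-", 1)[0].split("_", 1)[0].lower()
--     letters = "".join(ch for ch in primary if ch.isalpha())
--     if len(letters) < 2:
--         return None
--     return letters[:2]
-- ===== SOURCE B (Python) =====
-- def _two_letter_language_code(language: object) -> str | None:
--     value = str(language or "").strip()
--     if not value:
--         return None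
--     buf = []
--     for ch in value:
--         if ch == "-" or ch == "_":
--             break
--         if ch.isalpha():
--             buf.append(ch.lower())
--             if len(buf) == 2:
--                 return "".join(buf)
--     return None
-- ===== Notes on version B (the rewrite author's own statement) =====
-- stated objective: alternative
-- what changed: Replaced the split/lowercase/alpha-filter-comprehension/slice pipeline over intermediate strings by a single character scan of the stripped value that stops at the first delimiter and returns as soon as two letters are collected.
import Mathlib
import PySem

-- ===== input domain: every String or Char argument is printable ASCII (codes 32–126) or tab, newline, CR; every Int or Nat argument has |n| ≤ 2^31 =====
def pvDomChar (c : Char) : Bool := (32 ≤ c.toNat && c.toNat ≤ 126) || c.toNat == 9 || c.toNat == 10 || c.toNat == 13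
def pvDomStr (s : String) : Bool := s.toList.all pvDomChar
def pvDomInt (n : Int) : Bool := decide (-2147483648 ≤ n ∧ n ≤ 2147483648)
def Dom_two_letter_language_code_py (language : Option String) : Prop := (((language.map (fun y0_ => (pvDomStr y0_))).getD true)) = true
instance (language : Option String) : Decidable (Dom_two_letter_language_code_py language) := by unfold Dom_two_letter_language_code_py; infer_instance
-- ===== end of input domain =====

-- B replaces the split/filter/slice pipeline by one early-exiting scan of the stripped value (objective: alternative; return value only).

-- B replaces A's split/lower/filter/slice pipeline over intermediate strings by one early-exiting scan of the stripped value (alternative decomposition; return value only).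

-- ===== PORT A =====
-- value.split("-", 1)[0].split("_", 1)[0].lower(): sep is nonempty and split results are nonempty, so the getD/headD defaults never fire
def two_letter_language_code_py (language : Option String) : Option String :=
  let value := PySem.Str.strip (language.getD "")
  if value = "" then none
  else
    let primary := PySem.Chars.lower
      ((((PySem.Chars.splitMax?
           (((PySem.Chars.splitMax? value.toList ['-'] 1).getD []).headD [])
           ['_'] 1).getD []).headD []))
    let letters := primary.filter PySem.Chars.isalpha
    if letters.length < 2 then none
    else some (String.ofList (PySem.List.slice letters none (some 2)))

-- ===== PORT B =====
-- the scan: break at the first '-'/'_', collect lowercased letters, return as soon as two are collected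
def pvAltLoop : List Char → List Char → Option String
  | [], _ => none
  | c :: rest, buf =>
    if c = '-' ∨ c = '_' then none
    else if PySem.Chars.isalpha c then
      let buf' := buf ++ [PySem.Chars.lowerChar c]
      if buf'.length = 2 then some (String.ofList buf') else pvAltLoop rest buf'
    else pvAltLoop rest buf

def two_letter_language_code_py_alt (language : Option String) : Option String :=
  let value := PySem.Str.strip (language.getD "")
  if value = "" then none
  else pvAltLoop value.toList []

-- ===== PRECONDITION & SPEC =====
def Spec_two_letter_language_code_py (language : Option String) (out : Option String) : Prop := out = two_letter_language_code_py_alt language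
instance (language : Option String) (out : Option String) : Decidable (Spec_two_letter_language_code_py language out) := by unfold Spec_two_letter_language_code_py; infer_instance

-- ===== CLAIM (what is proved, stated in full; the proofs are below) =====
def Claim_equal_two_letter_language_code_py : Prop := ∀ (language : Option String), Dom_two_letter_language_code_py language → Spec_two_letter_language_code_py language (two_letter_language_code_py language)

-- ===== LEMMAS AND PROOFS =====

lemma pv_go_m0_head (sep : List Char) (fuel : ℕ) (l cur : List Char) (x : List Char) (acc : List (List Char)) :
    (PySem.Chars.splitOnMax.go sep fuel 0 l cur (acc ++ [x])).head?.getD [] = x := by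
  rw [PySem.Chars.splitOnMax.go.eq_def]
  rcases fuel with _ | fuel <;> rcases l with _ | ⟨c, rest⟩ <;> simp

lemma pv_go_head (sep : Char) :
    ∀ (l : List Char) (fuel : ℕ) (cur : List Char), l.length < fuel →
      (PySem.Chars.splitOnMax.go [sep] fuel 1 l cur []).head?.getD [] =
        cur.reverse ++ l.takeWhile (fun c => c ≠ sep) := by
  intro l
  induction l with
  | nil =>
    intro fuel cur h
    rw [PySem.Chars.splitOnMax.go.eq_def]
    rcases fuel with _ | fuel <;> simp
  | cons c rest ih =>
    intro fuel cur h
    rcases fuel with _ | fuel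
    · omega
    rw [PySem.Chars.splitOnMax.go.eq_def]
    by_cases hc : c = sep
    · subst hc
      have hpre : [c].isPrefixOf (c :: rest) = true := by simp [List.isPrefixOf]
      have hm := pv_go_m0_head [c] fuel (List.drop 1 (c :: rest)) [] cur.reverse []
      simp only [List.nil_append] at hm
      simpa [hpre, List.takeWhile] using hm
    · have hpre : [sep].isPrefixOf (c :: rest) = false := by
        simp [List.isPrefixOf, Ne.symm hc]
      have h2 := ih fuel (c :: cur) (by simpa using Nat.lt_of_succ_lt_succ h)
      simp [hpre, hc, h2, List.takeWhile]

lemma pv_split_head (sep : Char) (l : List Char) :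
    (((PySem.Chars.splitMax? l [sep] 1).getD []).headD []) = l.takeWhile (fun c => c ≠ sep) := by
  have := pv_go_head sep l (l.length + 1) [] (Nat.lt_succ_self _)
  simpa [PySem.Chars.splitMax?, PySem.Chars.splitOnMax, List.headD_eq_head?_getD] using this

lemma pv_isalpha_lowerChar (c : Char) : PySem.Chars.isalpha (PySem.Chars.lowerChar c) = PySem.Chars.isalpha c := by
  simp only [PySem.Chars.lowerChar]
  split_ifs with h
  · simp only [PySem.Chars.isupper, Bool.and_eq_true, decide_eq_true_eq, Char.le_def,
      UInt32.le_iff_toNat_le] at h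
    have hA : ('A' : Char).val.toNat = 65 := rfl
    have hZ : ('Z' : Char).val.toNat = 90 := rfl
    rw [hA, hZ] at h
    have hv : (c.val.toNat + 32).isValidChar := by constructor; omega
    have ht : (Char.ofNat (c.val.toNat + 32)).toNat = c.val.toNat + 32 := by
      rw [Char.toNat_ofNat, if_pos hv]
    have hct : c.toNat = c.val.toNat := rfl
    rw [hct]
    simp only [PySem.Chars.isalpha, PySem.Chars.isupper, PySem.Chars.islower, Char.le_def,
      UInt32.le_iff_toNat_le]
    have ht' : (Char.ofNat (c.val.toNat + 32)).val.toNat = c.val.toNat + 32 := ht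
    rw [ht']
    have ha : ('a' : Char).val.toNat = 97 := rfl
    have hz : ('z' : Char).val.toNat = 122 := rfl
    rw [hA, hZ, ha, hz]
    have e1 : 97 ≤ c.val.toNat + 32 := by omega
    have e2 : c.val.toNat + 32 ≤ 122 := by omega
    have e3 : ¬ (c.val.toNat + 32 ≤ 90) := by omega
    have h1 : 65 ≤ c.toNat := by rw [hct]; exact h.1
    have h2 : c.toNat ≤ 90 := by rw [hct]; exact h.2
    simp [h1, h2]
  · rfl

lemma pv_filter_lower (l : List Char) :
    (PySem.Chars.lower l).filter PySem.Chars.isalpha = (l.filter PySem.Chars.isalpha).map PySem.Chars.lowerChar := by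
  simp [PySem.Chars.lower, List.filter_map, Function.comp_def, pv_isalpha_lowerChar]

lemma pv_takeWhile_two (l : List Char) :
    ((l.takeWhile (fun c => c ≠ '-')).takeWhile (fun c => c ≠ '_')) = l.takeWhile (fun c => ¬(c = '-' ∨ c = '_')) := by
  induction l with
  | nil => rfl
  | cons c rest ih =>
    by_cases h1 : c = '-' <;> by_cases h2 : c = '_' <;>
      simp [List.takeWhile, h1, h2, ih] <;> simp_all

lemma pv_altLoop_spec :
    ∀ (l buf : List Char), buf.length < 2 →
      pvAltLoop l buf =
        (let letters := buf ++ ((l.takeWhile (fun c => ¬(c = '-' ∨ c = '_'))).filter PySem.Chars.isalpha).map PySem.Chars.lowerChar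
         if letters.length < 2 then none else some (String.ofList (letters.take 2))) := by
  intro l
  induction l with
  | nil =>
    intro buf h
    simp [pvAltLoop, h]
  | cons c rest ih =>
    intro buf h
    by_cases hd : c = '-' ∨ c = '_'
    · simp [pvAltLoop, hd, List.takeWhile, h]
    · by_cases ha : PySem.Chars.isalpha c
      · by_cases h2 : (buf ++ [PySem.Chars.lowerChar c]).length = 2
        · have hbl : buf.length = 1 := by
            have := List.length_append (as := buf) (bs := [PySem.Chars.lowerChar c]) ▸ h2
            simpa using this
          obtain ⟨b, hb⟩ : ∃ b, buf = [b] := by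
            rcases buf with _ | ⟨b, rest'⟩ <;> simp_all
          subst hb
          simp only [pvAltLoop, hd, ha, if_false, if_true, h2]
          simp [List.takeWhile, hd, ha, List.take]
        · have hb1 : (buf ++ [PySem.Chars.lowerChar c]).length < 2 := by
            simp only [List.length_append, List.length_singleton] at h2 ⊢
            omega
          simp only [pvAltLoop, hd, ha, if_false, if_true, h2]
          rw [ih _ hb1]
          simp [List.takeWhile, hd, ha]
      · simp only [pvAltLoop, hd, ha, if_false]
        rw [ih _ h]
        simp [List.takeWhile, hd, ha]

lemma pv_slice_two (l : List Char) : PySem.List.slice l none (some 2) = l.take 2 := by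
  rw [PySem.List.slice_to l (b := 2) (by norm_num)]; rfl


-- ===== VERDICT (by name: the statement is the Claim_ definition above) =====
set_option maxHeartbeats 1000000 in
theorem two_letter_language_code_py_spec : Claim_equal_two_letter_language_code_py := by
  intro language _
  unfold Spec_two_letter_language_code_py
  unfold two_letter_language_code_py two_letter_language_code_py_alt
  dsimp only
  by_cases he : PySem.Str.strip (language.getD "") = ""
  · rw [if_pos he, if_pos he]
  · rw [if_neg he, if_neg he]
    rw [pv_altLoop_spec _ [] (by simp), pv_split_head, pv_split_head, pv_takeWhile_two, pv_filter_lower]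
    dsimp only
    simp only [List.nil_append]
    simp only [pv_slice_two]
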